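-- pv_equiv track=rewrite | github.com/itzabhi2103/100-days-unstop- | pair_of_subarrays.py | calculate_pairs
-- ===== SOURCE A (Python) =====
-- from collections import defaultdict
-- import bisect
--
-- def calculate_pairs(n, arr):
--     sum_intervals = defaultdict(list)
--
--     for i in range(n):
--         current_sum = 0
--         for j in range(i, n):
--             current_sum+=arr[j]
--             sum_intervals[current_sum].append((i+1, j+1))
--     total_count = 0
--     for s in sum_intervals:
--         intervals = sum_intervals[s]
--         if len(intervals)<2:
--             continue
--         intervals.sort()
--         all_ends = sorted([inter[1] for inter in intervals])
--
--         for start, end in intervals: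
--             count = bisect.bisect_left(all_ends, start)
--             total_count+=count
--     return total_count
-- ===== SOURCE B (Python) =====
-- from collections import defaultdict
--
-- def _disjoint_pairs(intervals):
--     total = 0
--     rest = intervals
--     while rest:
--         (s1, e1), rest = rest[0], rest[1:]
--         total += sum(1 for (s2, e2) in rest if e1 < s2 or e2 < s1)
--     return total
--
-- def calculate_pairs(n, arr):
--     sum_intervals = defaultdict(list)
--     for i in range(n):
--         current_sum = 0
--         for j in range(i, n):
--             current_sum += arr[j]
--             sum_intervals[current_sum].append((i + 1, j + 1))
--     total_count = 0
--     for s in sum_intervals: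
--         total_count += _disjoint_pairs(sum_intervals[s])
--     return total_count
-- ===== Notes on version B (the rewrite author's own statement) =====
-- stated objective: simpler
-- what changed: Keeps A's O(n^2) grouping of subarray sums but replaces the whole counting phase (sort each group, sort the ends, bisect_left per interval) by a direct recursive scan that counts disjoint pairs with the symmetric test end1 < start2 or end2 < start1 - no sorting, no binary search.
import Mathlib
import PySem

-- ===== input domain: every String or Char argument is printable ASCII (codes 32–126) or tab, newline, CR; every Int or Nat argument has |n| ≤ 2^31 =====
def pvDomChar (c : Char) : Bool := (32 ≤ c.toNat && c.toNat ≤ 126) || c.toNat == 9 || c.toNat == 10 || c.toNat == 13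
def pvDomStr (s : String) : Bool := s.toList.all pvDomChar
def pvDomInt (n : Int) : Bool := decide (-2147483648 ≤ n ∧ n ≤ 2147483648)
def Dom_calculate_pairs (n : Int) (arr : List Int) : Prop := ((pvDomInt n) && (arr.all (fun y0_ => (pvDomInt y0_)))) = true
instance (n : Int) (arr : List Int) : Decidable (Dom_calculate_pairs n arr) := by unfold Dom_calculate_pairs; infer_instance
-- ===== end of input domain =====

-- B replaces A's sort + bisect counting phase by a direct recursive scan counting disjoint
-- interval pairs per sum group (simpler: no sorting, no binary search).

-- ===== PORT A =====
-- phase 1: sum_intervals = defaultdict(list); the nested loops over i, j accumulating current_sum.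
-- arr[j] is ported as pyGetD arr j 0: exact on Pre_ (0 ≤ j < n ≤ len arr); outside Pre_ Python raises IndexError.
def pvBuildA (n : Int) (arr : List Int) : PySem.Dict Int (List (Int × Int)) :=
  (PySem.List.pyRange 0 n 1).foldl
    (fun d i =>
      ((PySem.List.pyRange i n 1).foldl
        (fun (st : Int × PySem.Dict Int (List (Int × Int))) j =>
          let cs := st.1 + PySem.List.pyGetD arr j 0
          (cs, st.2.modify cs [] (fun l => l ++ [(i + 1, j + 1)])))
        (0, d)).2)
    PySem.Dict.empty

-- phase 2: for s in sum_intervals: …  intervals.sort() is sorted2 (tuple order);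
-- bisect.bisect_left is PySem.List.bisectLeft.
def calculate_pairs (n : Int) (arr : List Int) : Int :=
  let d := pvBuildA n arr
  d.keys.foldl
    (fun total s =>
      let intervals := d.getD s []
      if intervals.length < 2 then total
      else
        let sortedIntervals := PySem.List.sorted2 intervals (fun p => p.1) (fun p => p.2)
        let allEnds := PySem.List.sorted (sortedIntervals.map (fun p => p.2)) (fun x => x)
        sortedIntervals.foldl (fun t p => t + (PySem.List.bisectLeft allEnds p.1 : Int)) total)
    0

-- ===== PORT B =====
-- _disjoint_pairs: recursion on the group, counting pairs with the symmetric disjointness test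
def pvDisjointPairs : List (Int × Int) → Int
  | [] => 0
  | h :: rest =>
      ((rest.countP (fun q => decide (h.2 < q.1) || decide (q.2 < h.1)) : Nat) : Int)
        + pvDisjointPairs rest

-- identical phase 1 (Source B keeps A's grouping loop verbatim)
def pvBuildB (n : Int) (arr : List Int) : PySem.Dict Int (List (Int × Int)) :=
  (PySem.List.pyRange 0 n 1).foldl
    (fun d i =>
      ((PySem.List.pyRange i n 1).foldl
        (fun (st : Int × PySem.Dict Int (List (Int × Int))) j =>
          let cs := st.1 + PySem.List.pyGetD arr j 0
          (cs, st.2.modify cs [] (fun l => l ++ [(i + 1, j + 1)])))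
        (0, d)).2)
    PySem.Dict.empty

def calculate_pairs_alt (n : Int) (arr : List Int) : Int :=
  let d := pvBuildB n arr
  d.keys.foldl (fun total s => total + pvDisjointPairs (d.getD s [])) 0

-- ===== PRECONDITION & SPEC =====
-- Pre_ excludes exactly the inputs where Python A raises IndexError on arr[j] (n > len(arr)).
def Pre_calculate_pairs (n : Int) (arr : List Int) : Prop := n ≤ (arr.length : Int)
instance (n : Int) (arr : List Int) : Decidable (Pre_calculate_pairs n arr) := by
  unfold Pre_calculate_pairs; infer_instance

def pvWitness_calculate_pairs : Int × List Int := (3, [1, 2, 1])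

def Spec_calculate_pairs (n : Int) (arr : List Int) (out : Int) : Prop := out = calculate_pairs_alt n arr
instance (n : Int) (arr : List Int) (out : Int) : Decidable (Spec_calculate_pairs n arr out) := by unfold Spec_calculate_pairs; infer_instance

-- ===== CLAIM (what is proved, stated in full; the proofs are below) =====
def Claim_equal_calculate_pairs : Prop := ∀ (n : Int) (arr : List Int), Dom_calculate_pairs n arr → Pre_calculate_pairs n arr → Spec_calculate_pairs n arr (calculate_pairs n arr)


-- ===== LEMMAS AND PROOFS =====

-- bisect_left on a sorted list counts the elements < x
theorem pv_bisect_eq_countP (l : List Int) (x : Int) (h : l.Pairwise (fun a b => a ≤ b)) :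
    PySem.List.bisectLeft l x = l.countP (fun e => decide (e < x)) := by
  obtain ⟨hle, hlt, hge⟩ := PySem.List.bisectLeft_spec l x h
  set k := PySem.List.bisectLeft l x with hk
  have := List.take_append_drop k l
  rw [← this, List.countP_append]
  have h1 : (l.take k).countP (fun e => decide (e < x)) = k := by
    rw [List.countP_eq_length.mpr, List.length_take, min_eq_left hle]
    intro a ha
    obtain ⟨j, hj, rfl⟩ := List.mem_take_iff_getElem.mp ha
    simp only [decide_eq_true_eq]
    exact hlt j (lt_of_lt_of_le (lt_min_iff.mp hj).1 hle) (lt_min_iff.mp hj).1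
  have h2 : (l.drop k).countP (fun e => decide (e < x)) = 0 := by
    rw [List.countP_eq_zero]
    intro a ha
    obtain ⟨j, hj, rfl⟩ := List.mem_drop_iff_getElem.mp ha
    simp only [decide_eq_true_eq, not_lt]
    exact hge (k + j) (by omega) (by omega)
  omega

-- the per-group invariant: every recorded interval has start ≤ end
def pvGoodDict (d : PySem.Dict Int (List (Int × Int))) : Prop :=
  ∀ s p, p ∈ d.getD s [] → p.1 ≤ p.2

theorem pv_good_modify (d : PySem.Dict Int (List (Int × Int))) (hd : pvGoodDict d)
    (k : Int) (pr : Int × Int) (hpr : pr.1 ≤ pr.2) :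
    pvGoodDict (d.modify k [] (fun l => l ++ [pr])) := by
  intro s p hp
  rw [PySem.Dict.getD_modify] at hp
  split_ifs at hp with hs
  · rcases List.mem_append.mp hp with h | h
    · exact hd k p h
    · simp only [List.mem_singleton] at h; subst h; exact hpr
  · exact hd s p hp

theorem pv_good_inner (arr : List Int) (i : Int) (L : List Int) (hL : ∀ j ∈ L, i ≤ j)
    (st : Int × PySem.Dict Int (List (Int × Int))) (hst : pvGoodDict st.2) :
    pvGoodDict ((L.foldl
      (fun (st : Int × PySem.Dict Int (List (Int × Int))) j =>
        let cs := st.1 + PySem.List.pyGetD arr j 0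
        (cs, st.2.modify cs [] (fun l => l ++ [(i + 1, j + 1)])))
      st).2) := by
  induction L generalizing st with
  | nil => exact hst
  | cons j L ih =>
    simp only [List.foldl_cons]
    exact ih (fun x hx => hL x (by simp [hx]))
      _ (pv_good_modify _ hst _ _ (by have := hL j (by simp); simp; omega))

theorem pv_good_outer (n : Int) (arr : List Int) (M : List Int)
    (d : PySem.Dict Int (List (Int × Int))) (hd : pvGoodDict d) :
    pvGoodDict (M.foldl
      (fun d i =>
        ((PySem.List.pyRange i n 1).foldl
          (fun (st : Int × PySem.Dict Int (List (Int × Int))) j =>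
            let cs := st.1 + PySem.List.pyGetD arr j 0
            (cs, st.2.modify cs [] (fun l => l ++ [(i + 1, j + 1)])))
          (0, d)).2)
      d) := by
  induction M generalizing d with
  | nil => exact hd
  | cons i M ih =>
    simp only [List.foldl_cons]
    exact ih _ (pv_good_inner arr i _ (fun j hj => (PySem.List.mem_pyRange_one.mp hj).1) _ hd)

theorem pv_build_good (n : Int) (arr : List Int) : pvGoodDict (pvBuildA n arr) := by
  unfold pvBuildA
  exact pv_good_outer n arr _ _ (fun s p hp => by simp [PySem.Dict.getD_empty] at hp)

-- indicator split: for good intervals the two one-sided tests are exclusive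
theorem pv_countP_split (h : Int × Int) (t : List (Int × Int))
    (hh : h.1 ≤ h.2) (ht : ∀ q ∈ t, q.1 ≤ q.2) :
    t.countP (fun q => decide (q.2 < h.1)) + t.countP (fun q => decide (h.2 < q.1))
      = t.countP (fun q => decide (h.2 < q.1) || decide (q.2 < h.1)) := by
  induction t with
  | nil => rfl
  | cons a t ih =>
    have ha := ht a (by simp)
    have ih' := ih (fun q hq => ht q (by simp [hq]))
    simp only [List.countP_cons]
    by_cases h1 : a.2 < h.1 <;> by_cases h2 : h.2 < a.1 <;> simp [h1, h2] <;> omega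

-- the double count over a good group equals B's pair count
theorem pv_double_count (l : List (Int × Int)) (hl : ∀ p ∈ l, p.1 ≤ p.2) :
    (l.map (fun p => ((l.countP (fun q => decide (q.2 < p.1)) : Nat) : Int))).sum
      = pvDisjointPairs l := by
  induction l with
  | nil => rfl
  | cons h t ih =>
    have hh := hl h (by simp)
    have ht : ∀ q ∈ t, q.1 ≤ q.2 := fun q hq => hl q (by simp [hq])
    have ih' := ih ht
    simp only [List.map_cons, List.sum_cons, List.countP_cons, pvDisjointPairs]
    have hsplit := pv_countP_split h t hh ht
    have hdh : (decide (h.2 < h.1) : Bool) = false := by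
      simp only [decide_eq_false_iff_not]; omega
    have hmap : (t.map (fun p => ((t.countP (fun q => decide (q.2 < p.1)) + if decide (h.2 < p.1) then 1 else 0 : Nat) : Int))).sum
        = (t.map (fun p => ((t.countP (fun q => decide (q.2 < p.1)) : Nat) : Int))).sum
          + (t.map (fun p => ((if decide (h.2 < p.1) then 1 else 0 : Nat) : Int))).sum := by
      rw [← PySem.List.sum_map_add_int]
      congr 1
    have hind : (t.map (fun p => ((if decide (h.2 < p.1) then 1 else 0 : Nat) : Int))).sum
        = ((t.countP (fun p => decide (h.2 < p.1)) : Nat) : Int) := by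
      simp only [Nat.cast_ite, Nat.cast_one, Nat.cast_zero]
      rw [PySem.List.sum_map_ite_one_zero]
    rw [hdh] at *
    rw [hmap, hind, ih']
    push_cast [← hsplit]
    ring

-- A's whole per-group contribution equals B's
theorem pv_group_eq (l : List (Int × Int)) (hl : ∀ p ∈ l, p.1 ≤ p.2) (total : Int) :
    (if l.length < 2 then total
     else (PySem.List.sorted2 l (fun p => p.1) (fun p => p.2)).foldl
        (fun t p => t + (PySem.List.bisectLeft
            (PySem.List.sorted ((PySem.List.sorted2 l (fun p => p.1) (fun p => p.2)).map (fun p => p.2)) (fun x => x)) p.1 : Int)) total)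
      = total + pvDisjointPairs l := by
  by_cases hlen : l.length < 2
  · rw [if_pos hlen]
    match l, hlen with
    | [], _ => simp [pvDisjointPairs]
    | [a], _ => simp [pvDisjointPairs]
  · rw [if_neg hlen, PySem.List.foldl_add]
    congr 1
    have hperm : (PySem.List.sorted2 l (fun p => p.1) (fun p => p.2)).Perm l :=
      PySem.List.sorted2_perm l _ _ false
    have hg : ∀ p : Int × Int,
        (PySem.List.bisectLeft
          (PySem.List.sorted ((PySem.List.sorted2 l (fun p => p.1) (fun p => p.2)).map (fun p => p.2)) (fun x => x)) p.1 : Nat)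
        = l.countP (fun q => decide (q.2 < p.1)) := by
      intro p
      rw [pv_bisect_eq_countP _ _ (PySem.List.sorted_pairwise _ _)]
      rw [(PySem.List.sorted_perm _ _ _).countP_eq]
      rw [List.countP_map]
      exact hperm.countP_eq _
    calc ((PySem.List.sorted2 l (fun p => p.1) (fun p => p.2)).map
            (fun p => (PySem.List.bisectLeft
              (PySem.List.sorted ((PySem.List.sorted2 l (fun p => p.1) (fun p => p.2)).map (fun p => p.2)) (fun x => x)) p.1 : Int))).sum
        = ((PySem.List.sorted2 l (fun p => p.1) (fun p => p.2)).map
            (fun p => ((l.countP (fun q => decide (q.2 < p.1)) : Nat) : Int))).sum := by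
          simp only [hg]
      _ = (l.map (fun p => ((l.countP (fun q => decide (q.2 < p.1)) : Nat) : Int))).sum :=
          (hperm.map _).sum_eq
      _ = pvDisjointPairs l := pv_double_count l hl

-- ===== VERDICT (by name: the statement is the Claim_ definition above) =====
theorem calculate_pairs_spec : Claim_equal_calculate_pairs := by
  intro n arr _ _
  unfold Spec_calculate_pairs
  simp only [calculate_pairs, calculate_pairs_alt]
  have hb : pvBuildB n arr = pvBuildA n arr := rfl
  rw [hb]
  have hg := pv_build_good n arr
  apply PySem.List.foldl_congr_mem
  intro acc s _
  exact pv_group_eq _ (hg s) acc
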